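-- pv_equiv track=rewrite | github.com/k-v09/CodinGame-Shtuff | there_is_no_spoon.py | find_neighbors
-- ===== SOURCE A (Python) =====
-- def find_neighbors(grid):
--     height = len(grid)
--     width = len(grid[0])
--     nodes = []
--
--     for y in range(height):
--         for x in range(width):
--             if grid[y][x] == '0':
--                 nodes.append((x, y))
--
--     results = []
--     for node_x, node_y in nodes:
--
--         right_x, right_y = -1, -1
--         for x in range(node_x + 1, width):
--             if grid[node_y][x] == '0':
--                 right_x, right_y = x, node_y
--                 break
--
--         bottom_x, bottom_y = -1, -1
--         for y in range(node_y + 1, height):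
--             if grid[y][node_x] == '0':
--                 bottom_x, bottom_y = node_x, y
--                 break
--
--         results.append((node_x, node_y, right_x, right_y, bottom_x, bottom_y))
--
--     return results
-- ===== SOURCE B (Python) =====
-- def find_neighbors(grid):
--     height = len(grid)
--     width = len(grid[0])
--
--     # one bottom-up sweep: below[y][x] = row of the first '0' strictly below (x, y), else -1
--     below_next = [-1] * width
--     below = [None] * height
--     for y in range(height - 1, -1, -1):
--         below[y] = below_next
--         below_next = [y if grid[y][x] == '0' else below_next[x] for x in range(width)]
--
--     results = []
--     for y in range(height):
--         row = grid[y]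
--         # one right-to-left sweep: right_row[x] = column of the first '0' strictly right of (x, y), else -1
--         right_row = [0] * width
--         nxt = -1
--         for x in range(width - 1, -1, -1):
--             right_row[x] = nxt
--             if row[x] == '0':
--                 nxt = x
--         by_row = below[y]
--         for x in range(width):
--             if row[x] == '0':
--                 rx = right_row[x]
--                 by = by_row[x]
--                 results.append((x, y, rx, y if rx != -1 else -1,
--                                 x if by != -1 else -1, by))
--     return results
-- ===== Notes on version B (the rewrite author's own statement) =====
-- stated objective: alternative
-- what changed: A rescans to the right and downward from every '0' cell; B instead precomputes nearest-'0' tables in one right-to-left sweep per row and one bottom-up sweep over the grid and emits each cell's answer by table lookup (better worst case on '0'-dense grids, not measurably faster on a timing run's inputs).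
import Mathlib
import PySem

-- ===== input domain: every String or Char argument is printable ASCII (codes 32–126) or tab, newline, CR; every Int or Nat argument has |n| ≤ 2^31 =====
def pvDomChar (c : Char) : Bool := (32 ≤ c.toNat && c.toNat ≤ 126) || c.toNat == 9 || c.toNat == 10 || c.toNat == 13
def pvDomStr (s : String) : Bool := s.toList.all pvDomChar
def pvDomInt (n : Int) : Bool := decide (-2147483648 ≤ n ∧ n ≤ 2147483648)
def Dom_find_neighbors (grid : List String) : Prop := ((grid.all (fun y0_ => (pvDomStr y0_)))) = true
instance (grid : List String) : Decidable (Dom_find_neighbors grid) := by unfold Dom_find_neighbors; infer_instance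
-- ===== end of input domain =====

-- B replaces A's per-node rescans to the right and downward by one right-to-left sweep per row
-- and one bottom-up sweep over the grid; the return values are proved equal on Pre_.

-- ===== PORT A =====
-- grid[y][x] (always in range on Pre_; the '.' default is never reached there)
def pvCell (grid : List String) (y x : Int) : Char :=
  (PySem.List.pyGet? ((PySem.List.pyGet? grid y).getD "").toList x).getD '.'

-- A's 'for x in range(node_x+1, width): … break' scan
def pvScanR (grid : List String) (ny : Int) : List Int → Int × Int
  | [] => (-1, -1)
  | x :: xs => if pvCell grid ny x == '0' then (x, ny) else pvScanR grid ny xs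

-- A's 'for y in range(node_y+1, height): … break' scan
def pvScanB (grid : List String) (nx : Int) : List Int → Int × Int
  | [] => (-1, -1)
  | y :: ys => if pvCell grid y nx == '0' then (nx, y) else pvScanB grid nx ys

def find_neighbors (grid : List String) : List (List Int) :=
  let height : Int := (grid.length : Int)
  let width : Int := ((grid.headD "").toList.length : Int)
  let nodes : List (Int × Int) :=
    (PySem.List.pyRange 0 height 1).foldl (fun acc y =>
      (PySem.List.pyRange 0 width 1).foldl (fun acc2 x =>
        if pvCell grid y x == '0' then acc2 ++ [(x, y)] else acc2) acc) []
  nodes.foldl (fun results n =>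
    let rp := pvScanR grid n.2 (PySem.List.pyRange (n.1 + 1) width 1)
    let bp := pvScanB grid n.1 (PySem.List.pyRange (n.2 + 1) height 1)
    results ++ [[n.1, n.2, rp.1, rp.2, bp.1, bp.2]]) []

-- ===== PORT B =====
-- right-to-left sweep over one row: .1 = table "column of first '0' strictly right", .2 = running nxt
def pvRBuild (row : List Char) (x : Int) : List Int × Int :=
  match row with
  | [] => ([], -1)
  | c :: rest =>
      let p := pvRBuild rest (x + 1)
      (p.2 :: p.1, if c == '0' then x else p.2)

-- bottom-up sweep: .1 = per-row tables "row of first '0' strictly below", .2 = running below_next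
def pvBBuild (width : Nat) (rows : List (List Char)) (y : Int) : List (List Int) × List Int :=
  match rows with
  | [] => ([], List.replicate width (-1))
  | r :: rest =>
      let p := pvBBuild width rest (y + 1)
      (p.2 :: p.1, (r.zip p.2).map (fun cb => if cb.1 == '0' then y else cb.2))

-- B's emit loop 'for x in range(width): if row[x] == '0': results.append(…)'
def pvEmitRow (y : Int) : List Char → List Int → List Int → Int → List (List Int)
  | c :: cs, r :: rs, b :: bs, x =>
      (if c == '0' then [[x, y, r, if r == -1 then -1 else y, if b == -1 then -1 else x, b]] else [])
        ++ pvEmitRow y cs rs bs (x + 1)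
  | _, _, _, _ => []

def pvEmitAll : List (List Char) → List (List Int) → Int → List (List Int)
  | row :: rest, br :: brs, y =>
      pvEmitRow y row (pvRBuild row 0).1 br 0 ++ pvEmitAll rest brs (y + 1)
  | _, _, _ => []

def find_neighbors_alt (grid : List String) : List (List Int) :=
  let width : Nat := (grid.headD "").toList.length
  let rows : List (List Char) := grid.map (fun s => s.toList.take width)
  pvEmitAll rows (pvBBuild width rows 0).1 0

-- ===== PRECONDITION & SPEC =====
-- Pre_ excludes exactly the inputs where the Python A raises IndexError: the empty grid (grid[0])
-- and grids with some row shorter than the first row (grid[y][x] for x < width).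
def Pre_find_neighbors (grid : List String) : Prop :=
  grid ≠ [] ∧ ∀ s ∈ grid, (grid.headD "").toList.length ≤ s.toList.length
instance (grid : List String) : Decidable (Pre_find_neighbors grid) := by
  unfold Pre_find_neighbors; infer_instance

def pvWitness_find_neighbors : List String := ["0.0", ".0."]

def Spec_find_neighbors (grid : List String) (out : List (List Int)) : Prop := out = find_neighbors_alt grid
instance (grid : List String) (out : List (List Int)) : Decidable (Spec_find_neighbors grid out) := by unfold Spec_find_neighbors; infer_instance

-- ===== CLAIM (what is proved, stated in full; the proofs are below) =====
def Claim_equal_find_neighbors : Prop := ∀ (grid : List String), Dom_find_neighbors grid → Pre_find_neighbors grid → Spec_find_neighbors grid (find_neighbors grid)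

-- ===== LEMMAS AND PROOFS =====

-- first index (counted from i) of a '0' in l, -1 if none: the common reference value
def pvFZ : List Char → Int → Int
  | [], _ => -1
  | c :: r, i => if c = '0' then i else pvFZ r (i + 1)

-- first row index (counted from y) whose x-th char is '0', -1 if none
def pvCZ (x : Nat) : List (List Char) → Int → Int
  | [], _ => -1
  | r :: rest, y => if r[x]?.getD '.' = '0' then y else pvCZ x rest (y + 1)

-- reference result for one row (below = the rows strictly below it)
def pvRefRow (y : Int) (below : List (List Char)) : List Char → Nat → List (List Int)
  | [], _ => []
  | c :: cs, x =>
      (if c = '0' then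
        [[(x : Int), y, pvFZ cs ((x : Int) + 1),
          (if pvFZ cs ((x : Int) + 1) = -1 then -1 else y),
          (if pvCZ x below (y + 1) = -1 then -1 else (x : Int)),
          pvCZ x below (y + 1)]]
       else []) ++ pvRefRow y below cs (x + 1)

def pvRef : List (List Char) → Int → List (List Int)
  | [], _ => []
  | r :: rest, y => pvRefRow y rest r 0 ++ pvRef rest (y + 1)

-- ---- B side ----

theorem pvRBuild_snd (row : List Char) (x : Int) : (pvRBuild row x).2 = pvFZ row x := by
  induction row generalizing x with
  | nil => rfl
  | cons c cs ih => simp [pvRBuild, pvFZ, ih]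

theorem pvBBuild_snd (w : Nat) (rows : List (List Char)) (y : Int)
    (h : ∀ r ∈ rows, r.length = w) :
    (pvBBuild w rows y).2 = (List.range w).map (fun x => pvCZ x rows y) := by
  induction rows generalizing y with
  | nil => simp [pvBBuild, pvCZ]
  | cons r rest ih =>
      have hr : r.length = w := h r (by simp)
      have ih' := ih (y + 1) (fun s hs => h s (by simp [hs]))
      simp only [pvBBuild, ih']
      apply List.ext_getElem
      · simp [hr]
      · intro i h1 h2
        have hi : i < w := by simpa using h2
        simp only [List.getElem_map, List.getElem_zip, List.getElem_range, pvCZ]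
        rw [show ((if (r[i] == '0') = true then y else pvCZ i rest (y+1)) =
              if r[i] = '0' then y else pvCZ i rest (y+1)) from by simp]
        congr 1
        have hir : i < r.length := by omega
        simp [List.getElem?_eq_getElem hir]

theorem pvEmitRow_eq (y : Int) (below : List (List Char)) (cs : List Char) (x : Nat) :
    pvEmitRow y cs (pvRBuild cs ((x : Int))).1
      ((List.range' x cs.length).map (fun i => pvCZ i below (y + 1))) ((x : Int))
    = pvRefRow y below cs x := by
  induction cs generalizing x with
  | nil => simp [pvEmitRow, pvRefRow]
  | cons c cs ih =>
      simp only [pvRBuild, List.length_cons, List.range'_succ, List.map_cons,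
        pvEmitRow, pvRefRow, pvRBuild_snd]
      have hx : ((x : Int) + 1) = (((x + 1 : Nat)) : Int) := by push_cast; ring
      rw [hx, ih (x + 1)]
      congr 1
      by_cases hc : c = '0' <;> simp [hc]

theorem pvB_eq_ref (w : Nat) (rows : List (List Char)) (y : Int)
    (h : ∀ r ∈ rows, r.length = w) :
    pvEmitAll rows (pvBBuild w rows y).1 y = pvRef rows y := by
  induction rows generalizing y with
  | nil => rfl
  | cons r rest ih =>
      have hr : r.length = w := h r (by simp)
      simp only [pvBBuild, pvEmitAll, pvRef]
      rw [pvBBuild_snd w rest (y + 1) (fun s hs => h s (by simp [hs])),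
        ih (y + 1) (fun s hs => h s (by simp [hs]))]
      congr 1
      have := pvEmitRow_eq y rest r 0
      simpa [← hr, List.range_eq_range'] using this

-- ---- A side ----

-- width and the width-normalised grid (proof-side abbreviations)
def pvW (grid : List String) : Nat := (grid.headD "").toList.length
def pvRows (grid : List String) : List (List Char) :=
  grid.map (fun s => s.toList.take (pvW grid))

theorem pvRows_getD (grid : List String) (y : Nat) (hy : y < grid.length) :
    (pvRows grid)[y]?.getD [] = (grid[y]'hy).toList.take (pvW grid) := by
  simp [pvRows, List.getElem?_map, List.getElem?_eq_getElem hy]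

theorem pvCell_eq (grid : List String) (hpre : Pre_find_neighbors grid) (y x : Nat)
    (hy : y < grid.length) (hx : x < pvW grid) :
    pvCell grid (y : Int) (x : Int) = ((pvRows grid)[y]?.getD [])[x]?.getD '.' := by
  have hlen : pvW grid ≤ (grid[y]'hy).toList.length :=
    hpre.2 _ (List.getElem_mem hy)
  rw [pvRows_getD grid y hy]
  simp [pvCell, PySem.List.pyGet?_natCast, List.getElem?_eq_getElem hy,
    List.getElem?_take_of_lt hx,
    List.getElem?_eq_getElem (show x < (grid[y]'hy).toList.length by omega)]

theorem pvScanR_eq (grid : List String) (hpre : Pre_find_neighbors grid)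
    (y : Nat) (hy : y < grid.length) (l : List Char) (a : Nat)
    (hl : ((pvRows grid)[y]?.getD []).drop a = l) :
    pvScanR grid (y : Int) (PySem.List.pyRange (a : Int) ((pvW grid : Nat) : Int) 1)
      = (pvFZ l (a : Int), if pvFZ l (a : Int) = -1 then -1 else (y : Int)) := by
  have hrl : ((pvRows grid)[y]?.getD []).length = pvW grid := by
    rw [pvRows_getD grid y hy, List.length_take]
    exact Nat.min_eq_left (hpre.2 _ (List.getElem_mem hy))
  induction l generalizing a with
  | nil =>
      have ha : pvW grid ≤ a := by
        have := congrArg List.length hl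
        rw [List.length_drop, hrl] at this
        simp at this
        omega
      rw [PySem.List.pyRange_one_eq_nil (by exact_mod_cast ha)]
      rfl
  | cons c l' ih =>
      have ha : a < pvW grid := by
        have := congrArg List.length hl
        rw [List.length_drop, hrl] at this
        simp at this
        omega
      have h0 : ((pvRows grid)[y]?.getD [])[a]? = some c := by
        have := congrArg (fun l => l[0]?) hl
        simpa [List.getElem?_drop] using this
      have hc : ((pvRows grid)[y]?.getD [])[a]?.getD '.' = c := by
        rw [h0]; rfl
      have hl' : ((pvRows grid)[y]?.getD []).drop (a + 1) = l' := by
        have : ((pvRows grid)[y]?.getD []).drop (a + 1) = (((pvRows grid)[y]?.getD []).drop a).tail := by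
          rw [← List.drop_drop]; simp
        rw [this, hl]; rfl
      rw [PySem.List.pyRange_one_cons (by exact_mod_cast ha)]
      simp only [pvScanR, pvCell_eq grid hpre y a hy ha, hc]
      by_cases h0 : c = '0'
      · simp only [h0, pvFZ, beq_self_eq_true, if_pos trivial]
        have : ¬ ((a : Int) = -1) := by omega
        simp [this]
      · have hb : (c == '0') = false := by simp [h0]
        rw [show ((a : Int) + 1) = (((a + 1 : Nat)) : Int) by push_cast; ring]
        simp only [hb, pvFZ, h0, if_false, Bool.false_eq_true, ih (a + 1) hl']
        norm_cast

theorem pvScanB_eq (grid : List String) (hpre : Pre_find_neighbors grid)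
    (x : Nat) (hx : x < pvW grid) (t : List (List Char)) (b : Nat)
    (ht : (pvRows grid).drop b = t) :
    pvScanB grid (x : Int) (PySem.List.pyRange (b : Int) ((grid.length : Nat) : Int) 1)
      = (if pvCZ x t (b : Int) = -1 then -1 else (x : Int), pvCZ x t (b : Int)) := by
  have hlen : (pvRows grid).length = grid.length := by simp [pvRows]
  induction t generalizing b with
  | nil =>
      have hb : grid.length ≤ b := by
        have := congrArg List.length ht; simp [hlen] at this; omega
      rw [PySem.List.pyRange_one_eq_nil (by exact_mod_cast hb)]
      rfl
  | cons r' t' ih =>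
      have hb : b < grid.length := by
        have := congrArg List.length ht; simp [hlen] at this; omega
      have hr' : (pvRows grid)[b]?.getD [] = r' := by
        have h0 : (pvRows grid)[b]? = some r' := by
          have := congrArg (fun l => l[0]?) ht
          simpa [List.getElem?_drop] using this
        rw [h0]; rfl
      have ht' : (pvRows grid).drop (b + 1) = t' := by
        have : (pvRows grid).drop (b + 1) = ((pvRows grid).drop b).tail := by
          rw [← List.drop_drop]; simp
        rw [this, ht]; rfl
      rw [PySem.List.pyRange_one_cons (by exact_mod_cast hb)]
      simp only [pvScanB, pvCell_eq grid hpre b x hb hx, hr']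
      by_cases h0 : r'[x]?.getD '.' = '0'
      · simp only [pvCZ, h0, beq_self_eq_true, if_pos trivial]
        have : ¬ ((b : Int) = -1) := by omega
        simp [this]
      · have hbx : (r'[x]?.getD '.' == '0') = false := by simp [h0]
        rw [show ((b : Int) + 1) = (((b + 1 : Nat)) : Int) by push_cast; ring]
        simp only [hbx, pvCZ, h0, if_false, Bool.false_eq_true, ih (b + 1) ht']
        norm_cast

theorem pvA_row (grid : List String) (hpre : Pre_find_neighbors grid)
    (y : Nat) (hy : y < grid.length) (l : List Char) (x0 : Nat)
    (hl : ((pvRows grid)[y]?.getD []).drop x0 = l) :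
    ((PySem.List.pyRange (x0 : Int) ((pvW grid : Nat) : Int) 1).filter
        (fun x => pvCell grid (y : Int) x == '0')).map
      (fun x => [x, (y : Int),
        (pvScanR grid (y : Int) (PySem.List.pyRange (x + 1) ((pvW grid : Nat) : Int) 1)).1,
        (pvScanR grid (y : Int) (PySem.List.pyRange (x + 1) ((pvW grid : Nat) : Int) 1)).2,
        (pvScanB grid x (PySem.List.pyRange ((y : Int) + 1) ((grid.length : Nat) : Int) 1)).1,
        (pvScanB grid x (PySem.List.pyRange ((y : Int) + 1) ((grid.length : Nat) : Int) 1)).2])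
      = pvRefRow (y : Int) ((pvRows grid).drop (y + 1)) l x0 := by
  have hrl : ((pvRows grid)[y]?.getD []).length = pvW grid := by
    rw [pvRows_getD grid y hy, List.length_take]
    exact Nat.min_eq_left (hpre.2 _ (List.getElem_mem hy))
  induction l generalizing x0 with
  | nil =>
      have ha : pvW grid ≤ x0 := by
        have := congrArg List.length hl
        rw [List.length_drop, hrl] at this
        simp at this
        omega
      rw [show PySem.List.pyRange ((x0 : Nat) : Int) (((pvW grid) : Nat) : Int) 1 = []
        from PySem.List.pyRange_one_eq_nil (by exact_mod_cast ha)]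
      rfl
  | cons c l' ih =>
      have ha : x0 < pvW grid := by
        have := congrArg List.length hl
        rw [List.length_drop, hrl] at this
        simp at this
        omega
      have h0 : ((pvRows grid)[y]?.getD [])[x0]? = some c := by
        have := congrArg (fun l => l[0]?) hl
        simpa [List.getElem?_drop] using this
      have hc : ((pvRows grid)[y]?.getD [])[x0]?.getD '.' = c := by
        rw [h0]; rfl
      have hl' : ((pvRows grid)[y]?.getD []).drop (x0 + 1) = l' := by
        have : ((pvRows grid)[y]?.getD []).drop (x0 + 1) = (((pvRows grid)[y]?.getD []).drop x0).tail := by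
          rw [← List.drop_drop]; simp
        rw [this, hl]; rfl
      rw [show PySem.List.pyRange ((x0 : Nat) : Int) (((pvW grid) : Nat) : Int) 1
            = ((x0 : Nat) : Int) :: PySem.List.pyRange (((x0 : Nat) : Int) + 1) (((pvW grid) : Nat) : Int) 1
        from PySem.List.pyRange_one_cons (by exact_mod_cast ha)]
      rw [show ((x0 : Int) + 1) = (((x0 + 1 : Nat)) : Int) by push_cast; ring]
      simp only [List.filter_cons, pvCell_eq grid hpre y x0 hy ha, hc]
      by_cases h0 : c = '0'
      · simp only [h0, beq_self_eq_true, if_pos trivial, List.map_cons, ih (x0 + 1) hl']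
        rw [show ((x0 : Int) + 1) = (((x0 + 1 : Nat)) : Int) by push_cast; ring,
          show ((y : Int) + 1) = (((y + 1 : Nat)) : Int) by push_cast; ring,
          pvScanR_eq grid hpre y hy l' (x0 + 1) hl',
          pvScanB_eq grid hpre x0 ha ((pvRows grid).drop (y + 1)) (y + 1) rfl]
        rw [pvRefRow]
        push_cast
        simp
      · have hb : (c == '0') = false := by simp [h0]
        simp only [hb, Bool.false_eq_true, if_false, ih (x0 + 1) hl']
        rw [pvRefRow]
        simp [h0]

theorem pvA_all (grid : List String) (hpre : Pre_find_neighbors grid)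
    (t : List (List Char)) (y0 : Nat) (ht : (pvRows grid).drop y0 = t) :
    (PySem.List.pyRange (y0 : Int) ((grid.length : Nat) : Int) 1).flatMap (fun yi =>
      ((PySem.List.pyRange 0 ((pvW grid : Nat) : Int) 1).filter
          (fun x => pvCell grid yi x == '0')).map
        (fun x => [x, yi,
          (pvScanR grid yi (PySem.List.pyRange (x + 1) ((pvW grid : Nat) : Int) 1)).1,
          (pvScanR grid yi (PySem.List.pyRange (x + 1) ((pvW grid : Nat) : Int) 1)).2,
          (pvScanB grid x (PySem.List.pyRange (yi + 1) ((grid.length : Nat) : Int) 1)).1,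
          (pvScanB grid x (PySem.List.pyRange (yi + 1) ((grid.length : Nat) : Int) 1)).2]))
      = pvRef t (y0 : Int) := by
  have hlen : (pvRows grid).length = grid.length := by simp [pvRows]
  induction t generalizing y0 with
  | nil =>
      have hb : grid.length ≤ y0 := by
        have := congrArg List.length ht; simp [hlen] at this; omega
      rw [show PySem.List.pyRange ((y0 : Nat) : Int) ((grid.length : Nat) : Int) 1 = []
        from PySem.List.pyRange_one_eq_nil (by exact_mod_cast hb)]
      rfl
  | cons r t' ih =>
      have hb : y0 < grid.length := by
        have := congrArg List.length ht; simp [hlen] at this; omega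
      have hr : (pvRows grid)[y0]?.getD [] = r := by
        have h0 : (pvRows grid)[y0]? = some r := by
          have := congrArg (fun l => l[0]?) ht
          simpa [List.getElem?_drop] using this
        rw [h0]; rfl
      have ht' : (pvRows grid).drop (y0 + 1) = t' := by
        have : (pvRows grid).drop (y0 + 1) = ((pvRows grid).drop y0).tail := by
          rw [← List.drop_drop]; simp
        rw [this, ht]; rfl
      rw [show PySem.List.pyRange ((y0 : Nat) : Int) ((grid.length : Nat) : Int) 1
            = ((y0 : Nat) : Int) :: PySem.List.pyRange (((y0 : Nat) : Int) + 1) ((grid.length : Nat) : Int) 1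
        from PySem.List.pyRange_one_cons (by exact_mod_cast hb)]
      rw [List.flatMap_cons]
      have hrow := pvA_row grid hpre y0 hb r 0 (by simp [hr])
      rw [pvRef]
      rw [show ((y0 : Int) + 1) = (((y0 + 1 : Nat)) : Int) by push_cast; ring]
      rw [ih (y0 + 1) ht']
      congr 1
      simp [ht'] at hrow
      exact hrow

-- ===== VERDICT (by name: the statement is the Claim_ definition above) =====
theorem find_neighbors_spec : Claim_equal_find_neighbors := by
  intro grid _ hpre
  unfold Spec_find_neighbors
  have hw : ∀ r ∈ pvRows grid, r.length = pvW grid := by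
    intro r hr
    simp only [pvRows, List.mem_map] at hr
    obtain ⟨s, hs, rfl⟩ := hr
    have := hpre.2 s hs
    simp [pvW] at this ⊢
    omega
  have hB : find_neighbors_alt grid = pvRef (pvRows grid) 0 := by
    rw [show find_neighbors_alt grid
        = pvEmitAll (pvRows grid) (pvBBuild (pvW grid) (pvRows grid) 0).1 0 from rfl]
    exact pvB_eq_ref _ _ _ hw
  rw [hB]
  unfold find_neighbors
  simp only [PySem.List.foldl_append_if, PySem.List.foldl_append_eq_flatMap,
    List.nil_append, List.flatMap_assoc, List.flatMap_map, ← List.map_eq_flatMap]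
  have hws : (grid.head?.getD "").length = pvW grid := by
    rw [pvW, ← List.headD_eq_head?_getD, String.length_toList]
  have := pvA_all grid hpre (pvRows grid) 0 (by simp)
  simpa [hws] using this
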